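-- pv_equiv track=rewrite | github.com/123456789067g/segment-anything-1 | redlines.py | pick_entry
-- ===== SOURCE A (Python) =====
-- def pick_entry(candidates, expect_group: str):
--     if not candidates:
--         return None
--     if expect_group:
--         for e in candidates:
--             if str(e.get("group", "")) == str(expect_group):
--                 return e
--     return sorted(candidates, key=lambda e: len(str(e.get("video_id") or "")))[0]
-- ===== SOURCE B (Python) =====
-- def pick_entry(candidates, expect_group: str):
--     best = None
--     best_len = 0
--     for e in candidates:
--         if expect_group and str(e.get("group", "")) == str(expect_group):
--             return e
--         vid_len = len(str(e.get("video_id") or ""))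
--         if best is None or vid_len < best_len:
--             best, best_len = e, vid_len
--     return best
-- ===== Notes on version B (the rewrite author's own statement) =====
-- stated objective: alternative
-- what changed: A scans for a group match and then sorts the whole list by video_id length to take element 0; B makes a single pass that early-returns the first group match and otherwise maintains a running first-minimum (shortest video_id) candidate, so no sort and no second traversal.
import Mathlib
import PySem

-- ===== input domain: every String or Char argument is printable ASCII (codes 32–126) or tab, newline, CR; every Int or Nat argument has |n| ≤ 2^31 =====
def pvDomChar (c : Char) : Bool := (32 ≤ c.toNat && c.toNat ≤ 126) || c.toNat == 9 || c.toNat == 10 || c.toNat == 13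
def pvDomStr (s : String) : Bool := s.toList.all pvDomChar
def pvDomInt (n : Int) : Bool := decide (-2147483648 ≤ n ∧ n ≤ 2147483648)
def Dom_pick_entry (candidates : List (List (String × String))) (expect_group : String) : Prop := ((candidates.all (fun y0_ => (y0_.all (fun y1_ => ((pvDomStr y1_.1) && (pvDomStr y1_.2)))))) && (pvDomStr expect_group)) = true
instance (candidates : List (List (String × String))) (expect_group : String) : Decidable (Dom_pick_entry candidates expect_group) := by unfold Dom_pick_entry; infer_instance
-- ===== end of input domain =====

-- B replaces A's sort-then-index fallback by one pass that early-returns on the first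
-- group match and otherwise keeps a running shortest-video_id candidate (objective: alternative).

-- len(str(e.get("video_id") or "")) — values are strings, so str() is the identity and
-- 'x or ""' is (get? …).getD "" (None → "", "" → "")
def pvVidLen (e : List (String × String)) : Int :=
  PySem.Str.len (((PySem.Dict.mk e).get? "video_id").getD "")

-- str(e.get("group", "")) == str(expect_group) — both sides already strings
def pvGroupHit (e : List (String × String)) (expect_group : String) : Bool :=
  (PySem.Dict.mk e).getD "group" "" == expect_group

-- ===== PORT A =====
def pick_entry (candidates : List (List (String × String))) (expect_group : String) : Option (List (String × String)) :=
  if candidates = [] then none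
  else
    match (if expect_group ≠ "" then
             candidates.find? (fun e => pvGroupHit e expect_group)
           else none) with
    | some e => some e
    | none => (PySem.List.sorted candidates pvVidLen false).head?

-- ===== PORT B =====
def pickLoop (expect_group : String) (best : Option (List (String × String) × Int)) :
    List (List (String × String)) → Option (List (String × String))
  | [] => best.map Prod.fst
  | e :: rest =>
    if expect_group ≠ "" ∧ pvGroupHit e expect_group then some e
    else
      let vid_len := pvVidLen e
      match best with
      | none => pickLoop expect_group (some (e, vid_len)) rest
      | some (b, best_len) =>
          if vid_len < best_len then pickLoop expect_group (some (e, vid_len)) rest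
          else pickLoop expect_group (some (b, best_len)) rest

def pick_entry_alt (candidates : List (List (String × String))) (expect_group : String) : Option (List (String × String)) :=
  pickLoop expect_group none candidates

-- ===== PRECONDITION & SPEC =====
def Spec_pick_entry (candidates : List (List (String × String))) (expect_group : String) (out : Option (List (String × String))) : Prop := out = pick_entry_alt candidates expect_group
instance (candidates : List (List (String × String))) (expect_group : String) (out : Option (List (String × String))) : Decidable (Spec_pick_entry candidates expect_group out) := by unfold Spec_pick_entry; infer_instance

-- ===== CLAIM (what is proved, stated in full; the proofs are below) =====
def Claim_equal_pick_entry : Prop := ∀ (candidates : List (List (String × String))) (expect_group : String), Dom_pick_entry candidates expect_group → Spec_pick_entry candidates expect_group (pick_entry candidates expect_group)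

-- ===== LEMMAS AND PROOFS =====

-- the running-min step and its fold ("first element of minimal pvVidLen")
def pvStep (b e : List (String × String)) : List (String × String) :=
  if pvVidLen e < pvVidLen b then e else b

def pvSel (b : List (String × String)) (xs : List (List (String × String))) : List (String × String) :=
  xs.foldl pvStep b

def pvMinsel : List (List (String × String)) → Option (List (String × String))
  | [] => none
  | b :: xs => some (pvSel b xs)

lemma pickLoop_of_find (exg : String) (xs : List (List (String × String)))
    (e : List (String × String)) (hx : xs.find? (fun e => pvGroupHit e exg) = some e)
    (hg : exg ≠ "") (best : Option (List (String × String) × Int)) :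
    pickLoop exg best xs = some e := by
  induction xs generalizing best with
  | nil => simp at hx
  | cons c cs ih =>
    rw [List.find?_cons] at hx
    by_cases hc : pvGroupHit c exg
    · simp [hc] at hx
      subst hx
      simp [pickLoop, hg, hc]
    · simp [hc] at hx
      have hcond : ¬ (exg ≠ "" ∧ pvGroupHit c exg = true) := by simp [hc]
      cases best with
      | none =>
        simp only [pickLoop, if_neg hcond]
        exact ih hx _
      | some p =>
        obtain ⟨b, bl⟩ := p
        simp only [pickLoop, if_neg hcond]
        split <;> exact ih hx _

lemma pickLoop_no_match (exg : String) (xs : List (List (String × String)))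
    (h : ∀ e ∈ xs, ¬ (exg ≠ "" ∧ pvGroupHit e exg)) (b : List (String × String)) :
    pickLoop exg (some (b, pvVidLen b)) xs = some (pvSel b xs) := by
  induction xs generalizing b with
  | nil => simp [pickLoop, pvSel]
  | cons c cs ih =>
    have hc := h c (by simp)
    simp only [pickLoop, if_neg hc]
    have hrest : ∀ e ∈ cs, ¬ (exg ≠ "" ∧ pvGroupHit e exg) := fun e he => h e (by simp [he])
    by_cases hlt : pvVidLen c < pvVidLen b
    · rw [if_pos hlt, ih hrest c]
      simp [pvSel, pvStep, hlt]
    · rw [if_neg hlt, ih hrest b]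
      simp [pvSel, pvStep, hlt]

lemma head_insertBy (x h : List (String × String)) (t : List (List (String × String))) :
    (PySem.List.insertBy (fun a b => decide (pvVidLen a < pvVidLen b)) x (h :: t)).head? =
      some (pvStep h x) := by
  simp only [PySem.List.insertBy, pvStep]
  split <;> simp_all

lemma minsel_append (zs : List (List (String × String))) (x : List (String × String)) :
    pvMinsel (zs ++ [x]) = some ((pvMinsel zs).elim x (fun m => pvStep m x)) := by
  cases zs with
  | nil => simp [pvMinsel, pvSel]
  | cons b bs => simp [pvMinsel, pvSel, List.foldl_append]

lemma head_sorted_eq_minsel (zs : List (List (String × String))) :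
    (PySem.List.sorted zs pvVidLen false).head? = pvMinsel zs := by
  induction zs using List.reverseRecOn with
  | nil => simp [PySem.List.sorted_eq_foldl_insertBy, pvMinsel]
  | append_singleton ys x ih =>
    rw [PySem.List.sorted_eq_foldl_insertBy] at ih ⊢
    rw [List.foldl_append, minsel_append]
    cases hs : List.foldl (fun acc x => PySem.List.insertBy (fun a b => decide (pvVidLen a < pvVidLen b)) x acc) [] ys with
    | nil =>
      have : ys = [] := by
        rw [← PySem.List.sorted_eq_foldl_insertBy] at hs
        exact (PySem.List.sorted_eq_nil_iff ys pvVidLen false).mp hs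
      subst this
      simp [pvMinsel, PySem.List.insertBy] at *
    | cons h t =>
      rw [hs] at ih
      simp only [List.foldl_cons, List.foldl_nil, head_insertBy]
      simp only [List.head?_cons] at ih
      rw [← ih]
      rfl

lemma no_match_of_find_none (exg : String) (xs : List (List (String × String)))
    (hf : exg ≠ "" → xs.find? (fun e => pvGroupHit e exg) = none) :
    ∀ e ∈ xs, ¬ (exg ≠ "" ∧ pvGroupHit e exg) := by
  rintro e he ⟨hg, hhit⟩
  have := List.find?_eq_none.mp (hf hg) e he
  simp [hhit] at this

lemma pickLoop_eq_minsel (exg : String) (xs : List (List (String × String)))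
    (h : ∀ e ∈ xs, ¬ (exg ≠ "" ∧ pvGroupHit e exg)) :
    pickLoop exg none xs = pvMinsel xs := by
  cases xs with
  | nil => simp [pickLoop, pvMinsel]
  | cons c cs =>
    have hc := h c (by simp)
    simp only [pickLoop, if_neg hc, pvMinsel]
    exact pickLoop_no_match exg cs (fun e he => h e (by simp [he])) c

-- ===== VERDICT (by name: the statement is the Claim_ definition above) =====
theorem pick_entry_spec : Claim_equal_pick_entry := by
  intro candidates exg _dom
  unfold Spec_pick_entry pick_entry pick_entry_alt
  by_cases hnil : candidates = []
  · subst hnil; simp [pickLoop]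
  · rw [if_neg hnil]
    by_cases hg : exg ≠ ""
    · cases hf : candidates.find? (fun e => pvGroupHit e exg) with
      | some e =>
        simp only [if_pos hg]
        exact (pickLoop_of_find exg candidates e hf hg none).symm
      | none =>
        simp only [if_pos hg]
        rw [head_sorted_eq_minsel,
          pickLoop_eq_minsel exg candidates (no_match_of_find_none exg candidates (fun _ => hf))]
    · simp only [if_neg hg]
      rw [head_sorted_eq_minsel,
        pickLoop_eq_minsel exg candidates (fun e _ h => hg h.1)]
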